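-- pv_equiv track=rewrite | github.com/tommotom/LeetCode | Contest/Weekly-Contest-314/1.py | hardestWorker
-- ===== SOURCE A (Python) =====
-- from typing import List
--
-- def hardestWorker(n: int, logs: List[List[int]]) -> int:
--     logs = [[0,0]] + logs
--     ans = 0
--     time = 0
--     for i in range(1, len(logs)):
--         t = logs[i][1] - logs[i-1][1]
--         if time < t:
--             time = t
--             ans = logs[i][0]
--         elif time == t:
--             ans = min(ans, logs[i][0])
--
--     return ans
-- ===== SOURCE B (Python) =====
-- def hardestWorker(n, logs):
--     # One pass builds the duration/id lists (with the phantom [0,0] entry),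
--     # then: maximum duration, then minimum id among its achievers.
--     durations = [0]
--     ids = [0]
--     prev = 0
--     for log in logs:
--         durations.append(log[1] - prev)
--         ids.append(log[0])
--         prev = log[1]
--     mx = max(durations)
--     return min(i for i, d in zip(ids, durations) if d == mx)
-- ===== Notes on version B (the rewrite author's own statement) =====
-- stated objective: alternative
-- what changed: B builds the duration and id lists in one pass and then takes the maximum duration and, in a separate pass, the minimum id among all workers achieving it, instead of A's single running-champion loop with in-loop tie-breaking.
import Mathlib
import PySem

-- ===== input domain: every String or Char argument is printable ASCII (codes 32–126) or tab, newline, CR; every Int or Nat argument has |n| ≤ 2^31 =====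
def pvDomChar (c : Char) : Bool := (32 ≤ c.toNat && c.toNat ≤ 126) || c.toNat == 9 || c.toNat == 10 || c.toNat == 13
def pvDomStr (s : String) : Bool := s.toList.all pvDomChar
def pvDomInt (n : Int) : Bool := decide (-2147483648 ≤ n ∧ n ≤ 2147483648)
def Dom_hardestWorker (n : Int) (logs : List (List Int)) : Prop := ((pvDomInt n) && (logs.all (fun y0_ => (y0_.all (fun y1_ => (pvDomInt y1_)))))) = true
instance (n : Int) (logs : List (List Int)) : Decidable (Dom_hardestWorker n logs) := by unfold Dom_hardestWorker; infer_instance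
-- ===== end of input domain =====

-- B replaces A's single running-champion loop by: build durations/ids, take max duration,
-- then the min id among its achievers (alternative decomposition; return value only, no mutation).

-- ===== PORT A =====
-- loop body of A's 'for i in range(1, len(logs))'; pyGetD is exact here: under
-- Pre_ every row has length ≥ 2 and the indices i, i-1 are in range of logs2
def aBody (logs2 : List (List Int)) (st : Int × Int) (i : Int) : Int × Int :=
  let t := PySem.List.pyGetD (PySem.List.pyGetD logs2 i []) 1 0
         - PySem.List.pyGetD (PySem.List.pyGetD logs2 (i-1) []) 1 0
  if st.2 < t then (PySem.List.pyGetD (PySem.List.pyGetD logs2 i []) 0 0, t)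
  else if st.2 = t then (min st.1 (PySem.List.pyGetD (PySem.List.pyGetD logs2 i []) 0 0), st.2)
  else st

def hardestWorker (n : Int) (logs : List (List Int)) : Int :=
  let logs2 := [([0,0] : List Int)] ++ logs
  ((PySem.List.pyRange 1 (logs2.length : Int) 1).foldl (aBody logs2) ((0 : Int), (0 : Int))).1

-- ===== PORT B =====
-- state (durations, ids, prev); pyGetD is exact under Pre_ (rows have length ≥ 2),
-- and the .getD 0 defaults after max?/min? are never taken: both lists are nonempty.
def hardestWorker_alt (n : Int) (logs : List (List Int)) : Int :=
  let st := logs.foldl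
    (fun (st : List Int × List Int × Int) log =>
      (st.1 ++ [PySem.List.pyGetD log 1 0 - st.2.2],
       st.2.1 ++ [PySem.List.pyGetD log 0 0],
       PySem.List.pyGetD log 1 0))
    ([0], [0], 0)
  let durations := st.1
  let ids := st.2.1
  let mx := (PySem.List.max? durations (fun x => x)).getD 0
  ((PySem.List.min? ((ids.zip durations).filterMap
      (fun p => if p.2 = mx then some p.1 else none)) (fun x => x)).getD 0)

-- ===== PRECONDITION & SPEC =====
-- Pre_: every log row has at least two entries (A reads logs[i][0] and logs[i][1];
-- on a shorter row the Python raises IndexError).  The proof itself is independent of Pre_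
-- (both ports read rows the same way), but Pre_ marks exactly where Python A returns.
def Pre_hardestWorker (n : Int) (logs : List (List Int)) : Prop :=
  ∀ r ∈ logs, 2 ≤ r.length
instance (n : Int) (logs : List (List Int)) : Decidable (Pre_hardestWorker n logs) := by
  unfold Pre_hardestWorker; infer_instance
def pvWitness_hardestWorker : Int × List (List Int) := (2, [[1,3],[2,5]])

def Spec_hardestWorker (n : Int) (logs : List (List Int)) (out : Int) : Prop := out = hardestWorker_alt n logs
instance (n : Int) (logs : List (List Int)) (out : Int) : Decidable (Spec_hardestWorker n logs out) := by unfold Spec_hardestWorker; infer_instance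

-- ===== CLAIM (what is proved, stated in full; the proofs are below) =====
def Claim_equal_hardestWorker : Prop := ∀ (n : Int) (logs : List (List Int)), Dom_hardestWorker n logs → Pre_hardestWorker n logs → Spec_hardestWorker n logs (hardestWorker n logs)

-- ===== LEMMAS AND PROOFS =====

-- the (id, duration) pairs both programs are really about
def pairsOf : List (List Int) → Int → List (Int × Int)
  | [], _ => []
  | r :: rs, prev =>
      (PySem.List.pyGetD r 0 0, PySem.List.pyGetD r 1 0 - prev) :: pairsOf rs (PySem.List.pyGetD r 1 0)

def stepA (st : Int × Int) (p : Int × Int) : Int × Int :=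
  if st.2 < p.2 then (p.1, p.2)
  else if st.2 = p.2 then (min st.1 p.1, st.2)
  else st

def maxM (t : Int) (ps : List (Int × Int)) : Int := ps.foldl (fun m p => max m p.2) t
def winners (m : Int) (ps : List (Int × Int)) : List Int :=
  ps.filterMap (fun p => if p.2 = m then some p.1 else none)
def listMin : List Int → Int
  | [] => 0
  | x :: xs => xs.foldl min x

lemma maxM_cons (t : Int) (p : Int × Int) (ps : List (Int × Int)) :
    maxM t (p :: ps) = maxM (max t p.2) ps := rfl

lemma le_maxM : ∀ (ps : List (Int × Int)) (t : Int), t ≤ maxM t ps := by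
  intro ps
  induction ps with
  | nil => intro t; exact le_refl t
  | cons p ps ih =>
      intro t
      calc t ≤ max t p.2 := le_max_left _ _
        _ ≤ maxM (max t p.2) ps := ih _

lemma maxM_mem : ∀ (ps : List (Int × Int)) (t : Int),
    maxM t ps = t ∨ ∃ p ∈ ps, p.2 = maxM t ps := by
  intro ps
  induction ps with
  | nil => intro t; exact Or.inl rfl
  | cons p ps ih =>
      intro t
      rcases ih (max t p.2) with h | ⟨q, hq, hq2⟩
      · rw [maxM_cons, h]
        rcases le_or_gt p.2 t with h1 | h1
        · exact Or.inl (max_eq_left h1)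
        · exact Or.inr ⟨p, List.mem_cons_self, (max_eq_right (le_of_lt h1)).symm⟩
      · exact Or.inr ⟨q, List.mem_cons_of_mem _ hq, by rw [maxM_cons]; exact hq2⟩

lemma winners_cons (m : Int) (p : Int × Int) (ps : List (Int × Int)) :
    winners m (p :: ps) = if p.2 = m then p.1 :: winners m ps else winners m ps := by
  simp only [winners, List.filterMap_cons]
  split <;> simp_all

lemma listMin_cons_cons (x y : Int) (l : List Int) :
    listMin (x :: y :: l) = listMin (min x y :: l) := rfl

-- the champion loop computes: (min id among max-duration entries, max duration),
-- where the starting accumulator (a, t) takes part as a phantom entry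
lemma foldA_eq : ∀ (ps : List (Int × Int)) (a t : Int),
    ps.foldl stepA (a, t) =
      (listMin (if t = maxM t ps then a :: winners (maxM t ps) ps else winners (maxM t ps) ps),
       maxM t ps) := by
  intro ps
  induction ps with
  | nil => intro a t; simp [maxM, winners, listMin]
  | cons p ps ih =>
      intro a t
      rw [List.foldl_cons]
      rcases lt_trichotomy t p.2 with hlt | heq | hgt
      · have hstep : stepA (a, t) p = (p.1, p.2) := by simp [stepA, hlt]
        rw [hstep, ih p.1 p.2]
        have hm : maxM t (p :: ps) = maxM p.2 ps := by
          rw [maxM_cons, max_eq_right hlt.le]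
        rw [hm, winners_cons]
        have htne : t ≠ maxM p.2 ps := by
          have := le_maxM ps p.2; omega
        rw [if_neg htne]
      · have hstep : stepA (a, t) p = (min a p.1, p.2) := by simp [stepA, heq]
        rw [hstep, ih (min a p.1) p.2]
        have hm : maxM t (p :: ps) = maxM p.2 ps := by
          rw [maxM_cons, heq, max_self]
        rw [hm, winners_cons, heq]
        by_cases hc : p.2 = maxM p.2 ps
        · simp only [if_pos hc, ← listMin_cons_cons]
        · simp only [if_neg hc]
      · have hstep : stepA (a, t) p = (a, t) := by
          have h1 : ¬ t < p.2 := by omega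
          have h2 : ¬ t = p.2 := by omega
          simp [stepA, h1, h2]
        rw [hstep, ih a t]
        have hm : maxM t (p :: ps) = maxM t ps := by
          rw [maxM_cons, max_eq_left hgt.le]
        have hpne : p.2 ≠ maxM t ps := by
          have := le_maxM ps t; omega
        rw [hm, winners_cons, if_neg hpne]

-- A's index loop over [ [0,0] ] ++ logs is the stepA fold over the (id, duration) pairs
lemma bridge : ∀ (rest pre : List (List Int)) (r0 : List Int) (st : Int × Int),
    (PySem.List.pyRange ((pre.length : Int) + 1) ((pre.length : Int) + 1 + (rest.length : Int)) 1).foldl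
        (aBody (pre ++ r0 :: rest)) st
      = (pairsOf rest (PySem.List.pyGetD r0 1 0)).foldl stepA st := by
  intro rest
  induction rest with
  | nil =>
      intro pre r0 st
      rw [PySem.List.pyRange_one_eq_nil (by simp)]
      simp [pairsOf]
  | cons r1 rs ih =>
      intro pre r0 st
      have hcons := PySem.List.pyRange_one_cons
        (a := (pre.length : Int) + 1) (b := (pre.length : Int) + 1 + ((r1 :: rs).length : Int))
        (by simp)
      rw [hcons, List.foldl_cons]
      have hget1 : PySem.List.pyGetD (pre ++ r0 :: r1 :: rs) ((pre.length : Int) + 1) ([] : List Int) = r1 := by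
        have : ((pre.length : Int) + 1) = ((pre.length + 1 : Nat) : Int) := by push_cast; ring
        rw [this, PySem.List.pyGetD_natCast]
        rw [show pre ++ r0 :: r1 :: rs = (pre ++ [r0]) ++ r1 :: rs by simp]
        rw [show pre.length + 1 = (pre ++ [r0]).length by simp]
        simp [List.getD]
      have hget0 : PySem.List.pyGetD (pre ++ r0 :: r1 :: rs) ((pre.length : Int) + 1 - 1) ([] : List Int) = r0 := by
        rw [show ((pre.length : Int) + 1 - 1) = ((pre.length : Nat) : Int) by ring]
        rw [PySem.List.pyGetD_natCast]
        simp [List.getD]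
      have hbody : aBody (pre ++ r0 :: r1 :: rs) st ((pre.length : Int) + 1)
          = stepA st (PySem.List.pyGetD r1 0 0, PySem.List.pyGetD r1 1 0 - PySem.List.pyGetD r0 1 0) := by
        simp only [aBody, stepA, hget1, hget0]
      rw [hbody]
      have harg : (pre.length : Int) + 1 + 1 = (((pre ++ [r0]).length : Nat) : Int) + 1 := by
        simp
      have harg2 : (pre.length : Int) + 1 + ((r1 :: rs).length : Int)
          = (((pre ++ [r0]).length : Nat) : Int) + 1 + (rs.length : Int) := by
        simp; ring
      have hlist : pre ++ r0 :: r1 :: rs = (pre ++ [r0]) ++ r1 :: rs := by simp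
      rw [harg, harg2, hlist, ih (pre ++ [r0]) r1]
      simp [pairsOf]

lemma hardestWorker_eq (n : Int) (logs : List (List Int)) :
    hardestWorker n logs = ((pairsOf logs 0).foldl stepA ((0 : Int), (0 : Int))).1 := by
  unfold hardestWorker
  have h := bridge logs [] ([0,0] : List Int) ((0 : Int), (0 : Int))
  simp only [List.length_nil, Nat.cast_zero, zero_add, List.nil_append] at h
  have hlen : (((([0,0] : List Int) :: logs).length : Nat) : Int) = 1 + (logs.length : Int) := by
    simp; ring
  have hg : PySem.List.pyGetD ([0,0] : List Int) 1 0 = 0 := by decide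
  simp only [List.singleton_append, hlen, h, hg]

-- the B-side fold builds exactly the phantom-headed duration and id lists
lemma bfold : ∀ (l : List (List Int)) (ds ids : List Int) (prev : Int),
    l.foldl
      (fun (st : List Int × List Int × Int) log =>
        (st.1 ++ [PySem.List.pyGetD log 1 0 - st.2.2],
         st.2.1 ++ [PySem.List.pyGetD log 0 0],
         PySem.List.pyGetD log 1 0))
      (ds, ids, prev)
    = (ds ++ (pairsOf l prev).map Prod.snd,
       ids ++ (pairsOf l prev).map Prod.fst,
       (l.foldl (fun p r => PySem.List.pyGetD r 1 0) prev)) := by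
  intro l
  induction l with
  | nil => intro ds ids prev; simp [pairsOf]
  | cons r rs ih =>
      intro ds ids prev
      rw [List.foldl_cons, ih]
      simp [pairsOf]

lemma hardestWorker_alt_eq (n : Int) (logs : List (List Int)) :
    hardestWorker_alt n logs
      = (PySem.List.min? (winners (maxM 0 (pairsOf logs 0)) (((0 : Int), (0 : Int)) :: pairsOf logs 0))
          (fun x => x)).getD 0 := by
  unfold hardestWorker_alt
  dsimp only
  rw [bfold]
  dsimp only
  have hds : ([0] : List Int) ++ (pairsOf logs 0).map Prod.snd = 0 :: (pairsOf logs 0).map Prod.snd := rfl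
  have hids : ([0] : List Int) ++ (pairsOf logs 0).map Prod.fst = 0 :: (pairsOf logs 0).map Prod.fst := rfl
  rw [hds, hids, PySem.List.max?_id_cons]
  have hmx : ((pairsOf logs 0).map Prod.snd).foldl max 0 = maxM 0 (pairsOf logs 0) := by
    rw [List.foldl_map]; rfl
  have hzip : ((0 : Int) :: (pairsOf logs 0).map Prod.fst).zip
      ((0 : Int) :: (pairsOf logs 0).map Prod.snd) = ((0 : Int), (0 : Int)) :: pairsOf logs 0 := by
    simp [List.zip_map']
  simp only [Option.getD_some, hmx, hzip]
  rfl

-- ===== VERDICT (by name: the statement is the Claim_ definition above) =====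
theorem hardestWorker_spec : Claim_equal_hardestWorker := by
  intro n logs _ _
  unfold Spec_hardestWorker
  rw [hardestWorker_eq, hardestWorker_alt_eq, foldA_eq]
  set ps := pairsOf logs 0 with hps
  set M := maxM 0 ps with hM
  have hw : winners M (((0 : Int), (0 : Int)) :: ps)
      = if (0 : Int) = M then (0 : Int) :: winners M ps else winners M ps := by
    rw [winners_cons]
  rw [hw]
  by_cases h0 : (0 : Int) = M
  · rw [if_pos h0, PySem.List.min?_id_cons]
    rfl
  · rw [if_neg h0]
    have hne : winners M ps ≠ [] := by
      rcases maxM_mem ps 0 with h | ⟨p, hp, hp2⟩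
      · exact absurd h.symm h0
      · intro hnil
        have : (fun p : Int × Int => if p.2 = M then some p.1 else none) p = none :=
          List.filterMap_eq_nil_iff.mp hnil p hp
        simp [hp2] at this
        exact this hM.symm
    rcases hx : winners M ps with _ | ⟨w, l⟩
    · exact absurd hx hne
    · rw [PySem.List.min?_id_cons]
      rfl
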